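-- pv_equiv track=rewrite | github.com/ismails2/Algorithm-and-Data-Structures | CodingChallenges/CC5/solution.py | check_walls_cover
-- ===== SOURCE A (Python) =====
-- from typing import List
--
-- def look_direction(walls: List[int]) -> List[int]:
--     """
--     Extra function that can look in one direction to see which walls are visible
--     param: List of ints, the walls heights in order
--     result: List of ints, the number of walls visible
--     """
--     look = []
--     stack = []
--     look.append(0)
--     stack.append(walls[0])
--     max_left = walls[0]
--     for i in range(1, len(walls)):
--         if max_left < walls[i]:
--             max_left = walls[i]
--             stack.clear()
--         elif walls[i] >= stack[-1]:
--             while walls[i] >= stack[-1]: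
--                 stack.pop()
--                 if len(stack) == 0:
--                     break
--         look.append(len(stack))
--         stack.append(walls[i])
--     return look
--
-- def check_walls_cover(walls: List[int]) -> List[int]:
--     """
--     Finds the amount of walls visible in your location
--     param: list of ints, the walls heights in order
--     return: list of ints, number of walls that are visible in both directions
--     """
--     look_left = look_direction(walls)
--     walls = walls[::-1]
--     look_right = look_direction(walls)
--     look_right = look_right[::-1]
--     for i in range(len(look_right)):
--         look_right[i] = look_right[i] + look_left[i]
--     return look_right
-- ===== SOURCE B (Python) =====
-- from typing import List
--
-- def _count_records(cm: int, xs: List[int]) -> int: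
--     """Count elements of xs that strictly exceed the running maximum (seeded with cm)."""
--     cnt = 0
--     for x in xs:
--         if x > cm:
--             cnt += 1
--             cm = x
--     return cnt
--
-- def check_walls_cover(walls: List[int]) -> List[int]:
--     out = []
--     rev_prefix = []  # elements before the current position, nearest first
--     for i, x in enumerate(walls):
--         out.append(_count_records(x, rev_prefix) + _count_records(x, walls[i+1:]))
--         rev_prefix.insert(0, x)
--     return out
-- ===== Notes on version B (the rewrite author's own statement) =====
-- stated objective: simpler
-- what changed: Replaces the monotonic-stack sweep (look_direction applied to the list and its reversal, then combined) with a direct per-position count: for each index, scan leftwards and rightwards counting strictly increasing running maxima; this drops the stack, the max_left bookkeeping and the reversal/combination passes at the cost of O(n^2) scans.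
-- crash fix: On the empty list A raises IndexError (look_direction reads walls[0]); B naturally returns []. — e.g. on check_walls_cover([]): A raises IndexError, B returns []
import Mathlib
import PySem

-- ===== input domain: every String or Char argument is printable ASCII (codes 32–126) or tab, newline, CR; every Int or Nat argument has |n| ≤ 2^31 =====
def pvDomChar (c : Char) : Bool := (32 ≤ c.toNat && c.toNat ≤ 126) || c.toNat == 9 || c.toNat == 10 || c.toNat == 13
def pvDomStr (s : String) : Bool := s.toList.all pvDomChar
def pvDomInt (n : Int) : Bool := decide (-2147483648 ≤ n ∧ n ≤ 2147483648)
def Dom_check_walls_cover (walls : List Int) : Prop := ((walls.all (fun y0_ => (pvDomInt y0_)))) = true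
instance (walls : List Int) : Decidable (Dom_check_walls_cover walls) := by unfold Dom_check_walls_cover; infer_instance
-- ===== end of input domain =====

-- B replaces A's monotonic-stack sweep over the list and its reversal with a direct
-- per-position two-direction scan counting strictly increasing running maxima (simpler; not faster).

-- ===== PORT A =====
-- 'elif walls[i] >= stack[-1]: while …: pop; break on empty' — exact: popWhile does
-- nothing when the elif guard is false and stops exactly where the while breaks.
def popWhile (x : Int) : List Int → List Int
  | [] => []
  | t :: rest => if x ≥ t then popWhile x rest else t :: rest

-- one iteration of A's for-loop; state = (look reversed, stack top-first, max_left)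
def lookStep (s : List Int × List Int × Int) (x : Int) : List Int × List Int × Int :=
  let (look, stack, maxL) := s
  if maxL < x then (0 :: look, [x], x)
  else
    let stack' := popWhile x stack
    ((stack'.length : Int) :: look, x :: stack', maxL)

def look_direction (walls : List Int) : List Int :=
  match walls with
  | [] => []  -- Python raises IndexError on walls[0]; excluded by Pre_
  | w0 :: rest =>
    let st := rest.foldl lookStep ([0], [w0], w0)
    st.1.reverse

def check_walls_cover (walls : List Int) : List Int :=
  let look_left := look_direction walls
  let walls' := walls.reverse
  let look_right := (look_direction walls').reverse
  List.zipWith (fun r l => r + l) look_right look_left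

-- ===== PORT B =====
-- _count_records: count elements strictly exceeding the running maximum seeded with cm
def countUp (cm cnt : Int) : List Int → Int
  | [] => cnt
  | x :: xs => if x > cm then countUp x (cnt + 1) xs else countUp cm cnt xs

-- B's loop: p = rev_prefix (nearest first), the remaining list is walls[i:]
def cwcGo : List Int → List Int → List Int
  | _, [] => []
  | p, x :: s => (countUp x 0 p + countUp x 0 s) :: cwcGo (x :: p) s

def check_walls_cover_alt (walls : List Int) : List Int :=
  cwcGo [] walls

-- ===== PRECONDITION & SPEC =====
-- A raises IndexError on the empty list (look_direction reads walls[0]); excluded.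
def Pre_check_walls_cover (walls : List Int) : Prop := walls ≠ []
instance (walls : List Int) : Decidable (Pre_check_walls_cover walls) := by unfold Pre_check_walls_cover; infer_instance
def pvWitness_check_walls_cover : List Int := [2, 1, 3, 3]

-- On the empty list A raises IndexError (look_direction reads walls[0]); B naturally returns [].
def Raises_check_walls_cover (walls : List Int) : Prop := walls = []
instance (walls : List Int) : Decidable (Raises_check_walls_cover walls) := by unfold Raises_check_walls_cover; infer_instance
def pvRaiseWitness_check_walls_cover : List Int := []
def pvRaiseWitnessOut_check_walls_cover : List Int := []

def Spec_check_walls_cover (walls : List Int) (out : List Int) : Prop := out = check_walls_cover_alt walls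
instance (walls : List Int) (out : List Int) : Decidable (Spec_check_walls_cover walls out) := by unfold Spec_check_walls_cover; infer_instance

-- ===== CLAIM (what is proved, stated in full; the proofs are below) =====
def Claim_equal_check_walls_cover : Prop := ∀ (walls : List Int), Dom_check_walls_cover walls → Pre_check_walls_cover walls → Spec_check_walls_cover walls (check_walls_cover walls)
def Claim_raises_check_walls_cover : Prop := (∀ (walls : List Int), Dom_check_walls_cover walls → Raises_check_walls_cover walls → ¬ Pre_check_walls_cover walls) ∧ (Dom_check_walls_cover (pvRaiseWitness_check_walls_cover) ∧ Raises_check_walls_cover (pvRaiseWitness_check_walls_cover) ∧ check_walls_cover_alt (pvRaiseWitness_check_walls_cover) = pvRaiseWitnessOut_check_walls_cover)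

-- ===== LEMMAS AND PROOFS =====

-- A's stack after processing the reversed prefix r (nearest element first)
def records : List Int → List Int
  | [] => []
  | x :: p => x :: popWhile x (records p)

-- the look values A emits while processing rest, with reversed prefix r already seen
def lookList : List Int → List Int → List Int
  | _, [] => []
  | r, x :: rest => ((popWhile x (records r)).length : Int) :: lookList (x :: r) rest

-- B's left counts written in A's traversal order
def lookL : List Int → List Int → List Int
  | _, [] => []
  | p, x :: s => countUp x 0 p :: lookL (x :: p) s

-- the right counts in original order; q is appended to each suffix (generalization)
def lookRg : List Int → List Int → List Int
  | _, [] => []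
  | q, x :: s => countUp x 0 (s ++ q) :: lookRg q s

theorem mem_popWhile {x t : Int} {l : List Int} (h : t ∈ popWhile x l) : t ∈ l := by
  induction l with
  | nil => simp only [popWhile, List.not_mem_nil] at h
  | cons a as ih =>
    by_cases hx : x ≥ a
    · simp only [popWhile, if_pos hx] at h
      exact List.mem_cons_of_mem _ (ih h)
    · simpa [popWhile, if_neg hx] using h

theorem mem_records {t : Int} {r : List Int} (h : t ∈ records r) : t ∈ r := by
  induction r with
  | nil => simp only [records, List.not_mem_nil] at h
  | cons a as ih =>
    simp only [records, List.mem_cons] at h ⊢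
    rcases h with h | h
    · exact Or.inl h
    · exact Or.inr (ih (mem_popWhile h))

theorem popWhile_eq_nil {x : Int} {l : List Int} (h : ∀ t ∈ l, t ≤ x) : popWhile x l = [] := by
  induction l with
  | nil => rfl
  | cons a as ih =>
    have hx : x ≥ a := h a (List.mem_cons_self)
    simp only [popWhile, if_pos hx]
    exact ih (fun t ht => h t (List.mem_cons_of_mem _ ht))

theorem popWhile_popWhile {x y : Int} (hyx : y ≤ x) (l : List Int) :
    popWhile x (popWhile y l) = popWhile x l := by
  induction l with
  | nil => rfl
  | cons a as ih =>
    by_cases hy : y ≥ a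
    · have hx : x ≥ a := le_trans hy hyx
      simp only [popWhile, if_pos hy, if_pos hx, ih]
    · simp [popWhile, if_neg hy]

theorem countUp_acc (p : List Int) : ∀ x c, countUp x c p = c + countUp x 0 p := by
  induction p with
  | nil => intro x c; simp [countUp]
  | cons a as ih =>
    intro x c
    by_cases h : a > x
    · simp only [countUp, if_pos h]
      rw [ih a (c + 1), ih a (0 + 1)]; ring
    · simp only [countUp, if_neg h]
      exact ih x c

-- key bridge: B's leftward count equals the size of A's stack after popping
theorem countUp_eq_popWhile_records (p : List Int) :
    ∀ x, countUp x 0 p = ((popWhile x (records p)).length : Int) := by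
  induction p with
  | nil => intro x; simp [countUp, records, popWhile]
  | cons y q ih =>
    intro x
    by_cases h : y > x
    · have hx : ¬ x ≥ y := by omega
      simp only [countUp, if_pos h, records, popWhile, if_neg hx]
      rw [countUp_acc, ih y]
      push_cast [List.length_cons]; ring
    · have hx : x ≥ y := by omega
      simp only [countUp, if_neg h, records, popWhile, if_pos hx]
      rw [popWhile_popWhile hx, ih x]

-- the fold in look_direction computes lookList, reversed onto the accumulator
theorem foldl_lookStep (rest : List Int) :
    ∀ (acc r : List Int) (maxL : Int), (∀ t ∈ r, t ≤ maxL) →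
      (rest.foldl lookStep (acc, records r, maxL)).1 = (lookList r rest).reverse ++ acc := by
  induction rest with
  | nil => intro acc r maxL _; simp [lookList]
  | cons x xs ih =>
    intro acc r maxL hmax
    by_cases h : maxL < x
    · have hnil : popWhile x (records r) = [] :=
        popWhile_eq_nil (fun t ht => le_of_lt (lt_of_le_of_lt (hmax t (mem_records ht)) h))
      have hstack : records (x :: r) = [x] := by simp [records, hnil]
      have hbound : ∀ t ∈ x :: r, t ≤ x := by
        intro t ht
        rcases List.mem_cons.mp ht with rfl | ht
        · exact le_refl _
        · exact le_of_lt (lt_of_le_of_lt (hmax t ht) h)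
      simp only [List.foldl_cons, lookStep, if_pos h]
      rw [← hstack, ih (0 :: acc) (x :: r) x hbound]
      simp [lookList, hnil]
    · have hbound : ∀ t ∈ x :: r, t ≤ maxL := by
        intro t ht
        rcases List.mem_cons.mp ht with rfl | ht
        · omega
        · exact hmax t ht
      simp only [List.foldl_cons, lookStep, if_neg h]
      rw [show (x :: popWhile x (records r)) = records (x :: r) from rfl,
        ih _ (x :: r) maxL hbound]
      simp [lookList]

theorem lookList_eq_lookL (rest : List Int) : ∀ r, lookList r rest = lookL r rest := by
  induction rest with
  | nil => intro r; rfl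
  | cons x xs ih =>
    intro r
    simp [lookList, lookL, ih, countUp_eq_popWhile_records]

theorem look_direction_eq_lookL (w0 : Int) (rest : List Int) :
    look_direction (w0 :: rest) = lookL [] (w0 :: rest) := by
  have h := foldl_lookStep rest [(0 : Int)] [w0] w0 (by intro t ht; simp at ht; omega)
  simp only [records, popWhile] at h
  simp only [look_direction]
  rw [h, lookList_eq_lookL]
  simp [lookL, countUp]

theorem lookRg_append (w : List Int) :
    ∀ (q : List Int) (x : Int), lookRg q (w ++ [x]) = lookRg (x :: q) w ++ [countUp x 0 q] := by
  induction w with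
  | nil => intro q x; simp [lookRg]
  | cons y s ih =>
    intro q x
    simp only [List.cons_append, lookRg, ih, List.append_assoc]
    simp

-- the reversed look of the reversed list is the list of rightward counts
theorem lookL_reverse (v : List Int) :
    ∀ p, (lookL p v).reverse = lookRg p v.reverse := by
  induction v with
  | nil => intro p; rfl
  | cons x v' ih =>
    intro p
    simp only [lookL, List.reverse_cons, ih, lookRg_append]

theorem zip_lookRg_lookL (w : List Int) :
    ∀ p, List.zipWith (fun r l => r + l) (lookRg [] w) (lookL p w) = cwcGo p w := by
  induction w with
  | nil => intro p; rfl
  | cons x s ih =>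
    intro p
    simp only [lookRg, lookL, List.zipWith_cons_cons, cwcGo, List.append_nil, ih]
    rw [Int.add_comm]

-- ===== VERDICT (by name: the statement is the Claim_ definition above) =====
theorem check_walls_cover_spec : Claim_equal_check_walls_cover := by
  intro walls _ hpre
  unfold Spec_check_walls_cover
  cases walls with
  | nil => exact absurd rfl hpre
  | cons w0 rest =>
    show List.zipWith (fun r l => r + l) ((look_direction (w0 :: rest).reverse).reverse)
        (look_direction (w0 :: rest)) = cwcGo [] (w0 :: rest)
    have hrev : (w0 :: rest).reverse ≠ [] := by simp
    rw [look_direction_eq_lookL]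
    cases hv : (w0 :: rest).reverse with
    | nil => exact absurd hv hrev
    | cons a as =>
      rw [look_direction_eq_lookL, ← hv, lookL_reverse, List.reverse_reverse]
      exact zip_lookRg_lookL (w0 :: rest) []

@[simp] theorem check_walls_cover_raises : Claim_raises_check_walls_cover := by
  unfold Claim_raises_check_walls_cover
  exact ⟨fun walls _ hr => by simp [Raises_check_walls_cover] at hr; simp [Pre_check_walls_cover, hr],
    by decide⟩
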